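-- pv_equiv track=rewrite | github.com/FacesSpont/FacesLcs | src/run_main.py | lcsDist
-- ===== SOURCE A (Python) =====
-- def lcsDist(X, Y):
--
--     # Find LCS
--     m = len(X)
--     n = len(Y)
--     L = [[0 for x in range(n + 1)]
--             for y in range(m + 1)]
--     for i in range(m + 1):
--         for j in range(n + 1):
--             if (i == 0 or j == 0):
--                 L[i][j] = 0
--             elif (X[i - 1] == Y[j - 1]):
--                 L[i][j] = L[i - 1][j - 1] + 1
--             else:
--                 L[i][j] = max(L[i - 1][j],
--                               L[i][j - 1])
--
--     lcs = L[m][n]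
--
--     # Edit distance is delete operations +
--     # insert operations.
--     return (m - lcs) + (n - lcs)
-- ===== SOURCE B (Python) =====
-- def lcsDist(X, Y):
--     # Compute the insert/delete edit distance directly with a rolling 1-D row
--     # (distance DP, min+1 recurrence) instead of an LCS table plus arithmetic.
--     prev = list(range(len(Y) + 1))
--     for x in X:
--         cur = [prev[0] + 1]
--         left = cur[0]
--         for y, up_left, up in zip(Y, prev, prev[1:]):
--             left = up_left if x == y else 1 + min(up, left)
--             cur.append(left)
--         prev = cur
--     return prev[-1]
-- ===== Notes on version B (the rewrite author's own statement) =====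
-- stated objective: faster
-- what changed: B computes the insertion/deletion edit distance directly with a rolling one-dimensional row and a min+1 recurrence, instead of building a full (m+1)x(n+1) LCS-length table with a max recurrence and deriving the distance arithmetically at the end.
import Mathlib
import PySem

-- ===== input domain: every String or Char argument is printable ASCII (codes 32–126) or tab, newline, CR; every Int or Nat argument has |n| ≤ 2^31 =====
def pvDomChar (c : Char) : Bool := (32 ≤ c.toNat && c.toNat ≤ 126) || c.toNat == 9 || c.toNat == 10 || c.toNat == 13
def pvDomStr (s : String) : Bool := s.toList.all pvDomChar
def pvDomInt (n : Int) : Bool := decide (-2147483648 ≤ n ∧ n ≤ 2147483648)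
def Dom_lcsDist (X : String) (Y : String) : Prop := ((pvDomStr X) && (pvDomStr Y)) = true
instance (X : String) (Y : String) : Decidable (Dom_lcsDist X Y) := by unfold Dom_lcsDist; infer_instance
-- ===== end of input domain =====

-- B computes the insert/delete edit distance directly with a rolling 1-D row (min+1
-- recurrence, O(n) extra space) instead of A's full LCS table (max recurrence) plus
-- final arithmetic.

-- ===== PORT A =====
-- table read L[i][j]; all indices are in range in the Python, where getD is exact
def tGet (L : List (List Int)) (i j : Nat) : Int := (L.getD i []).getD j 0

-- the value assigned to L[i][j] by the loop body (branches in A's order;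
-- X[i-1], Y[j-1] are in range in the Python, so getD is exact)
def lcsCell (Xs Ys : List Char) (L : List (List Int)) (i j : Nat) : Int :=
  if i = 0 ∨ j = 0 then 0
  else if Xs.getD (i - 1) ' ' = Ys.getD (j - 1) ' ' then tGet L (i - 1) (j - 1) + 1
  else max (tGet L (i - 1) j) (tGet L i (j - 1))

-- inner loop: for j in range(n + 1): L[i][j] = …
def lcsInner (Xs Ys : List Char) (L : List (List Int)) (i : Nat) : List (List Int) :=
  (List.range (Ys.length + 1)).foldl
    (fun L j => L.set i ((L.getD i []).set j (lcsCell Xs Ys L i j))) L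

def lcsDist (X : String) (Y : String) : Int :=
  let Xs := X.toList
  let Ys := Y.toList
  let m := Xs.length
  let n := Ys.length
  -- L = [[0 for x in range(n+1)] for y in range(m+1)]
  let L0 : List (List Int) := (List.range (m + 1)).map (fun _ => (List.range (n + 1)).map (fun _ => (0 : Int)))
  -- for i in range(m + 1): for j in range(n + 1): …
  let L := (List.range (m + 1)).foldl (lcsInner Xs Ys) L0
  let lcs := tGet L m n
  ((m : Int) - lcs) + ((n : Int) - lcs)

-- ===== PORT B =====
-- inner loop: for y, up_left, up in zip(Y, prev, prev[1:]): …, carrying `left`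
def rowStep (x : Char) : List Char → List Int → Int → List Int
  | y :: ys, p0 :: p1 :: ps, left =>
      let c := if x = y then p0 else 1 + min p1 left
      c :: rowStep x ys (p1 :: ps) c
  | _, _, _ => []

-- one iteration of `for x in X`: cur = [prev[0] + 1]; inner loop; prev = cur
def altRow (Ys : List Char) (prev : List Int) (x : Char) : List Int :=
  let c0 := prev.headD 0 + 1
  c0 :: rowStep x Ys prev c0

def lcsDist_alt (X : String) (Y : String) : Int :=
  let Ys := Y.toList
  -- prev = list(range(len(Y) + 1))
  let row0 : List Int := (List.range (Ys.length + 1)).map (fun j => Int.ofNat j)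
  (X.toList.foldl (altRow Ys) row0).getLastD 0   -- return prev[-1]

-- ===== PRECONDITION & SPEC =====
def Spec_lcsDist (X : String) (Y : String) (out : Int) : Prop := out = lcsDist_alt X Y
instance (X : String) (Y : String) (out : Int) : Decidable (Spec_lcsDist X Y out) := by unfold Spec_lcsDist; infer_instance

-- ===== CLAIM (what is proved, stated in full; the proofs are below) =====
def Claim_equal_lcsDist : Prop := ∀ (X : String) (Y : String), Dom_lcsDist X Y → Spec_lcsDist X Y (lcsDist X Y)

-- ===== LEMMAS AND PROOFS =====

-- reference recurrences over prefix lengths: LCS length and insert/delete distance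
def lspec (Xs Ys : List Char) : Nat → Nat → Int
  | 0, _ => 0
  | _ + 1, 0 => 0
  | i + 1, j + 1 =>
      if Xs.getD i ' ' = Ys.getD j ' ' then lspec Xs Ys i j + 1
      else max (lspec Xs Ys i (j + 1)) (lspec Xs Ys (i + 1) j)
termination_by i j => i + j

def espec (Xs Ys : List Char) : Nat → Nat → Int
  | 0, j => (j : Int)
  | i + 1, 0 => (i : Int) + 1
  | i + 1, j + 1 =>
      if Xs.getD i ' ' = Ys.getD j ' ' then espec Xs Ys i j
      else 1 + min (espec Xs Ys i (j + 1)) (espec Xs Ys (i + 1) j)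
termination_by i j => i + j

lemma espec_zero (Xs Ys : List Char) (i : Nat) : espec Xs Ys i 0 = (i : Int) := by
  cases i <;> simp [espec]

lemma espec_lspec (Xs Ys : List Char) : ∀ i j, espec Xs Ys i j = (i : Int) + j - 2 * lspec Xs Ys i j := by
  intro i j
  induction i, j using espec.induct Xs Ys with
  | case1 j => simp [espec, lspec]
  | case2 i => simp [espec, lspec]
  | case3 i j h ih => simp only [espec, lspec, if_pos h, ih]; push_cast; ring
  | case4 i j h ih1 ih2 =>
      simp only [espec, lspec, if_neg h, ih1, ih2]
      rcases le_total (lspec Xs Ys i (j + 1)) (lspec Xs Ys (i + 1) j) with hle | hle <;>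
        [rw [max_eq_right hle]; rw [max_eq_left hle]] <;> push_cast <;> omega

-- getD/set helpers
lemma getD_set_ne {α : Type} (l : List α) (i j : Nat) (a d : α) (h : i ≠ j) :
    (l.set i a).getD j d = l.getD j d := by
  simp [List.getD, List.getElem?_set_ne h]

lemma getD_set_self {α : Type} (l : List α) (i : Nat) (a d : α) (h : i < l.length) :
    (l.set i a).getD i d = a := by
  simp [List.getD, h]

lemma getD_mem {α : Type} (l : List α) (i : Nat) (d : α) (h : i < l.length) :
    l.getD i d ∈ l := by
  rw [List.getD, List.getElem?_eq_getElem h]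
  exact List.getElem_mem h

def Shape (m n : Nat) (L : List (List Int)) : Prop :=
  L.length = m + 1 ∧ ∀ r ∈ L, r.length = n + 1

lemma shape_set {m n : Nat} {L : List (List Int)} (h : Shape m n L) (i j : Nat) (v : Int)
    (hi : i < L.length) : Shape m n (L.set i ((L.getD i []).set j v)) := by
  obtain ⟨h1, h2⟩ := h
  refine ⟨by simp [h1], ?_⟩
  intro r hr
  rcases List.mem_or_eq_of_mem_set hr with hr' | rfl
  · exact h2 _ hr'
  · rw [List.length_set]; exact h2 _ (getD_mem _ _ _ hi)

lemma tGet_set_ne (L : List (List Int)) (i j i' j' : Nat) (v : Int)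
    (hne : i' ≠ i ∨ j' ≠ j) :
    tGet (L.set i ((L.getD i []).set j v)) i' j' = tGet L i' j' := by
  by_cases hii : i' = i
  · subst hii
    rcases hne with h | h
    · exact absurd rfl h
    · by_cases hlen : i' < L.length
      · unfold tGet
        rw [getD_set_self _ _ _ _ hlen, getD_set_ne _ _ _ _ _ (Ne.symm h)]
      · unfold tGet
        rw [List.set_eq_of_length_le (by omega)]
  · unfold tGet
    rw [getD_set_ne _ _ _ _ _ (Ne.symm hii)]

lemma tGet_set_self (L : List (List Int)) (i j : Nat) (v : Int)
    (hi : i < L.length) (hj : j < (L.getD i []).length) :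
    tGet (L.set i ((L.getD i []).set j v)) i j = v := by
  unfold tGet
  rw [getD_set_self _ _ _ _ hi, getD_set_self _ _ _ _ hj]

-- partial inner loop, for the row invariant
def lcsInnerPart (Xs Ys : List Char) (i : Nat) (L : List (List Int)) (k : Nat) : List (List Int) :=
  (List.range k).foldl
    (fun L j => L.set i ((L.getD i []).set j (lcsCell Xs Ys L i j))) L

lemma lcsInner_eq_part (Xs Ys : List Char) (L : List (List Int)) (i : Nat) :
    lcsInner Xs Ys L i = lcsInnerPart Xs Ys i L (Ys.length + 1) := rfl

-- one row of A's table is correct, given all rows above it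
lemma inner_inv (Xs Ys : List Char) (i : Nat) (L : List (List Int))
    (hi : i ≤ Xs.length) (hshape : Shape Xs.length Ys.length L)
    (hbelow : ∀ i' j', i' < i → j' ≤ Ys.length → tGet L i' j' = lspec Xs Ys i' j') :
    ∀ k, k ≤ Ys.length + 1 →
      Shape Xs.length Ys.length (lcsInnerPart Xs Ys i L k) ∧
      (∀ i' j', i' < i → j' ≤ Ys.length → tGet (lcsInnerPart Xs Ys i L k) i' j' = lspec Xs Ys i' j') ∧
      (∀ j', j' < k → tGet (lcsInnerPart Xs Ys i L k) i j' = lspec Xs Ys i j') := by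
  intro k
  induction k with
  | zero => intro _; exact ⟨hshape, hbelow, by omega⟩
  | succ k ih =>
      intro hk
      obtain ⟨ihs, ihb, ihr⟩ := ih (by omega)
      set L' := lcsInnerPart Xs Ys i L k with hL'
      have hstep : lcsInnerPart Xs Ys i L (k + 1)
          = L'.set i ((L'.getD i []).set k (lcsCell Xs Ys L' i k)) := by
        rw [lcsInnerPart, List.range_succ (n := k), List.foldl_append]
        rfl
      have hilen : i < L'.length := by rw [ihs.1]; omega
      have hjlen : k < (L'.getD i []).length := by
        rw [ihs.2 _ (getD_mem _ _ _ hilen)]; omega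
      have hcell : lcsCell Xs Ys L' i k = lspec Xs Ys i k := by
        unfold lcsCell
        match i, k with
        | 0, k => simp [lspec]
        | i + 1, 0 => simp [lspec]
        | i + 1, k + 1 =>
            simp only [Nat.succ_ne_zero, or_self, if_false, Nat.add_sub_cancel]
            rw [ihb i k (by omega) (by omega), ihb i (k + 1) (by omega) (by omega),
              ihr k (by omega)]
            rw [lspec]
      refine ⟨?_, ?_, ?_⟩
      · rw [hstep]; exact shape_set ihs _ _ _ hilen
      · intro i' j' hi' hj'
        rw [hstep, tGet_set_ne _ _ _ _ _ _ (Or.inl (by omega))]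
        exact ihb i' j' hi' hj'
      · intro j' hj'
        rcases Nat.lt_or_ge j' k with h | h
        · rw [hstep, tGet_set_ne _ _ _ _ _ _ (Or.inr (by omega))]
          exact ihr j' h
        · have : j' = k := by omega
          subst this
          rw [hstep, tGet_set_self _ _ _ _ hilen hjlen, hcell]

-- the whole table is correct
lemma outer_inv (Xs Ys : List Char) :
    ∀ k, k ≤ Xs.length + 1 →
      Shape Xs.length Ys.length
        ((List.range k).foldl (lcsInner Xs Ys)
          ((List.range (Xs.length + 1)).map (fun _ => (List.range (Ys.length + 1)).map (fun _ => (0 : Int))))) ∧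
      (∀ i' j', i' < k → j' ≤ Ys.length →
        tGet ((List.range k).foldl (lcsInner Xs Ys)
          ((List.range (Xs.length + 1)).map (fun _ => (List.range (Ys.length + 1)).map (fun _ => (0 : Int))))) i' j'
          = lspec Xs Ys i' j') := by
  intro k
  induction k with
  | zero =>
      intro _
      refine ⟨⟨by simp, ?_⟩, fun i' j' h => absurd h (by omega)⟩
      intro r hr
      simp only [List.range_zero, List.foldl_nil, List.mem_map] at hr
      obtain ⟨_, _, rfl⟩ := hr
      simp
  | succ k ih =>
      intro hk
      obtain ⟨ihs, ihb⟩ := ih (by omega)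
      set L' := (List.range k).foldl (lcsInner Xs Ys)
        ((List.range (Xs.length + 1)).map (fun _ => (List.range (Ys.length + 1)).map (fun _ => (0 : Int)))) with hL'
      have hstep : (List.range (k + 1)).foldl (lcsInner Xs Ys)
          ((List.range (Xs.length + 1)).map (fun _ => (List.range (Ys.length + 1)).map (fun _ => (0 : Int))))
          = lcsInner Xs Ys L' k := by
        rw [List.range_succ (n := k), List.foldl_append]
        rfl
      have hin := inner_inv Xs Ys k L' (by omega) ihs
        (fun i' j' h1 h2 => ihb i' j' h1 h2) (Ys.length + 1) (le_refl _)
      rw [← lcsInner_eq_part] at hin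
      refine ⟨by rw [hstep]; exact hin.1, ?_⟩
      intro i' j' hi' hj'
      rcases Nat.lt_or_ge i' k with h | h
      · rw [hstep]; exact hin.2.1 i' j' h hj'
      · have : i' = k := by omega
        subst this
        rw [hstep]; exact hin.2.2 j' (by omega)

lemma lcsDist_eq_lspec (X Y : String) :
    lcsDist X Y = ((X.toList.length : Int) - lspec X.toList Y.toList X.toList.length Y.toList.length)
      + ((Y.toList.length : Int) - lspec X.toList Y.toList X.toList.length Y.toList.length) := by
  have h := (outer_inv X.toList Y.toList (X.toList.length + 1) (le_refl _)).2
    X.toList.length Y.toList.length (by omega) (le_refl _)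
  simp only [lcsDist]
  rw [h]

-- ===== B's side =====
lemma rowStep_inv (Xs Ys : List Char) (i : Nat) :
    ∀ t k, k + t = Ys.length →
      rowStep (Xs.getD i ' ') (Ys.drop k)
        ((List.range' k (t + 1)).map (fun j => espec Xs Ys i j)) (espec Xs Ys (i + 1) k)
      = (List.range' (k + 1) t).map (fun j => espec Xs Ys (i + 1) j) := by
  intro t
  induction t with
  | zero =>
      intro k hk
      have : Ys.drop k = [] := by rw [List.drop_eq_nil_iff]; omega
      rw [this]
      simp [rowStep, List.range']
  | succ t ih =>
      intro k hk
      have hklt : k < Ys.length := by omega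
      have hdrop : Ys.drop k = Ys[k] :: Ys.drop (k + 1) :=
        (List.getElem_cons_drop hklt).symm
      rw [hdrop]
      have hr1 : List.range' k (t + 1 + 1) = k :: List.range' (k + 1) (t + 1) := by
        simp [List.range'_succ]
      have hr2 : List.range' (k + 1) (t + 1) = (k + 1) :: List.range' (k + 2) t := by
        simp [List.range'_succ]
      rw [hr1, hr2]
      simp only [List.map_cons, rowStep]
      have hget : Ys[k] = Ys.getD k ' ' := by
        rw [List.getD, List.getElem?_eq_getElem hklt]; rfl
      have hc : (if Xs.getD i ' ' = Ys[k] then espec Xs Ys i k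
          else 1 + min (espec Xs Ys i (k + 1)) (espec Xs Ys (i + 1) k)) = espec Xs Ys (i + 1) (k + 1) := by
        rw [hget, espec]
      rw [hc]
      have := ih (k + 1) (by omega)
      rw [hr2] at this
      simp only [List.map_cons] at this ⊢
      rw [this]

lemma fold_inv (Xs Ys : List Char) :
    ∀ (l : List Char) (i : Nat), i + l.length = Xs.length → Xs.drop i = l →
      l.foldl (altRow Ys) ((List.range (Ys.length + 1)).map (fun j => espec Xs Ys i j))
      = (List.range (Ys.length + 1)).map (fun j => espec Xs Ys Xs.length j) := by
  intro l
  induction l with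
  | nil =>
      intro i h1 _
      simp only [List.length_nil] at h1
      subst h1
      rfl
  | cons x l ih =>
      intro i h1 h2
      have hilt : i < Xs.length := by simp at h1; omega
      have hgetD : Xs.getD i ' ' = Xs[i] := by
        rw [List.getD, List.getElem?_eq_getElem hilt]; rfl
      have h3 := List.getElem_cons_drop hilt
      rw [h2] at h3
      have hx : x = Xs.getD i ' ' := ((List.cons_eq_cons.mp h3).1.symm).trans hgetD.symm
      have hrange : List.range (Ys.length + 1) = 0 :: List.range' 1 Ys.length := by
        rw [List.range_eq_range', List.range'_succ]
      rw [List.foldl_cons]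
      have hstep : altRow Ys ((List.range (Ys.length + 1)).map (fun j => espec Xs Ys i j)) x
          = (List.range (Ys.length + 1)).map (fun j => espec Xs Ys (i + 1) j) := by
        unfold altRow
        rw [hrange]
        simp only [List.map_cons]
        have hhead : (espec Xs Ys i 0 :: (List.range' 1 Ys.length).map (fun j => espec Xs Ys i j)).headD 0 + 1
            = espec Xs Ys (i + 1) 0 := by
          simp only [List.headD_cons, espec_zero]; push_cast; ring
        rw [hhead]
        congr 1
        have h0 : (0 : Nat) + Ys.length = Ys.length := by omega
        have hrs := rowStep_inv Xs Ys i Ys.length 0 h0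
        simp only [List.drop_zero] at hrs
        have hr0 : List.range' 0 (Ys.length + 1) = 0 :: List.range' 1 Ys.length := by
          simp [List.range'_succ]
        rw [hr0] at hrs
        simp only [List.map_cons, Nat.zero_add] at hrs
        rw [← hx] at hrs
        exact hrs
      rw [hstep]
      exact ih (i + 1) (by simp at h1 ⊢; omega) (List.cons_eq_cons.mp h3).2

lemma getLastD_map_range (f : Nat → Int) (n : Nat) :
    ((List.range (n + 1)).map f).getLastD 0 = f n := by
  rw [List.range_succ, List.map_append]
  simp

lemma lcsDist_alt_eq_espec (X Y : String) :
    lcsDist_alt X Y = espec X.toList Y.toList X.toList.length Y.toList.length := by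
  simp only [lcsDist_alt]
  have hinit : (List.range (Y.toList.length + 1)).map (fun j => Int.ofNat j)
      = (List.range (Y.toList.length + 1)).map (fun j => espec X.toList Y.toList 0 j) := by
    apply List.ext_getElem
    · simp
    · intro idx h1 h2
      simp [espec]
  rw [hinit, fold_inv X.toList Y.toList X.toList 0 (by simp) (by simp),
    getLastD_map_range]

-- ===== VERDICT (by name: the statement is the Claim_ definition above) =====
theorem lcsDist_spec : Claim_equal_lcsDist := by
  intro X Y _
  unfold Spec_lcsDist
  rw [lcsDist_eq_lspec, lcsDist_alt_eq_espec, espec_lspec]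
  omega
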